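-- pv_equiv track=rewrite | github.com/1droozd1/MAI_Labs | 4_course/contest/1_12/k.py | max_singing_time
-- ===== SOURCE A (Python) =====
-- def max_singing_time(T, A, B, C):
--     golden_song_duration = 768
--     max_time = 0
--
--     dp = [0] * (T + 1)
--
--     songs = [A, B, C]
--
--     for song in songs:
--         for t in range(song, T + 1):
--             dp[t] = max(dp[t], dp[t - song] + song)
--
--     for i in range(T + 1):
--         if dp[i] > 0:
--             max_time = max(max_time, dp[i])
--
--     return max_time + golden_song_duration
-- ===== SOURCE B (Python) =====
-- def max_singing_time(T, A, B, C):
--     golden_song_duration = 768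
--     best = 0
--     reach = [True]  # reach[t]: t seconds exactly fillable with songs; reach[0] = True
--     for t in range(1, T + 1):
--         ok = any(0 < c <= t and reach[t - c] for c in (A, B, C))
--         reach.append(ok)
--         if ok:
--             best = t
--     return best + golden_song_duration
-- ===== Notes on version B (the rewrite author's own statement) =====
-- stated objective: alternative
-- what changed: Replaces A's three coin-major max-plus knapsack passes over an int dp array plus a final max scan by a single ascending boolean-reachability scan that consults all three durations at each t and tracks the best reachable sum directly.
import Mathlib
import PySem

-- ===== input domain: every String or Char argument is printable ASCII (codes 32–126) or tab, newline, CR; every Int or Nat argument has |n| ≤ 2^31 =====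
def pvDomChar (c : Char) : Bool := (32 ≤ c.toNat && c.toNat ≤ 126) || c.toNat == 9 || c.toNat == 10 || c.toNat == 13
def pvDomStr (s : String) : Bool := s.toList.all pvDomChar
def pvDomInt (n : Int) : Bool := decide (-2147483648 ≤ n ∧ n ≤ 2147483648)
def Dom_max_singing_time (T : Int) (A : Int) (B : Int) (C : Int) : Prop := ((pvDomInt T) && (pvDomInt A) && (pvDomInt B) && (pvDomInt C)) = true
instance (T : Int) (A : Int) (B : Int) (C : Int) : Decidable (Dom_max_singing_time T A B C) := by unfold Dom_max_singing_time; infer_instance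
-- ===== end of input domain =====

-- B replaces A's three max-plus knapsack passes by a single ascending boolean-reachability
-- scan that tracks the best reachable sum directly (objective: alternative, same O(T) cost).

-- ===== PORT A =====
def max_singing_time (T : Int) (A : Int) (B : Int) (C : Int) : Int :=
  -- dp = [0] * (T + 1)
  let dp0 : List Int := List.replicate (T + 1).toNat 0
  -- for song in songs: for t in range(song, T + 1): dp[t] = max(dp[t], dp[t - song] + song)
  let dp := [A, B, C].foldl (fun dp song =>
      (PySem.List.pyRange song (T + 1) 1).foldl (fun dp t =>
        PySem.List.pySetD dp t
          (max (PySem.List.pyGetD dp t 0) (PySem.List.pyGetD dp (t - song) 0 + song))) dp) dp0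
  -- for i in range(T + 1): if dp[i] > 0: max_time = max(max_time, dp[i])
  let maxTime := (PySem.List.pyRange 0 (T + 1) 1).foldl (fun m i =>
      if PySem.List.pyGetD dp i 0 > 0 then max m (PySem.List.pyGetD dp i 0) else m) 0
  maxTime + 768

-- ===== PORT B =====
def max_singing_time_alt (T : Int) (A : Int) (B : Int) (C : Int) : Int :=
  -- reach = [True]; for t in range(1, T+1): ok = any(0 < c <= t and reach[t-c] for c in (A,B,C)); reach.append(ok); if ok: best = t
  let st := (PySem.List.pyRange 1 (T + 1) 1).foldl (fun (st : List Bool × Int) t =>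
      let ok := [A, B, C].any (fun c =>
        decide (0 < c) && decide (c ≤ t) && ((PySem.List.pyGet? st.1 (t - c)).getD false))
      (st.1 ++ [ok], if ok then t else st.2)) ([true], 0)
  st.2 + 768

-- ===== PRECONDITION & SPEC =====
-- Pre_ excludes exactly the inputs on which A raises IndexError: a negative song duration
-- with song <= T makes dp[t]/dp[t - song] index out of range.
def Pre_max_singing_time (T : Int) (A : Int) (B : Int) (C : Int) : Prop :=
  (0 ≤ A ∨ T < A) ∧ (0 ≤ B ∨ T < B) ∧ (0 ≤ C ∨ T < C)
instance (T : Int) (A : Int) (B : Int) (C : Int) : Decidable (Pre_max_singing_time T A B C) := by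
  unfold Pre_max_singing_time; infer_instance

def pvWitness_max_singing_time : Int × Int × Int × Int := (10, 3, 5, 7)

def Spec_max_singing_time (T : Int) (A : Int) (B : Int) (C : Int) (out : Int) : Prop := out = max_singing_time_alt T A B C
instance (T : Int) (A : Int) (B : Int) (C : Int) (out : Int) : Decidable (Spec_max_singing_time T A B C out) := by unfold Spec_max_singing_time; infer_instance

-- ===== CLAIM (what is proved, stated in full; the proofs are below) =====
def Claim_equal_max_singing_time : Prop := ∀ (T : Int) (A : Int) (B : Int) (C : Int), Dom_max_singing_time T A B C → Pre_max_singing_time T A B C → Spec_max_singing_time T A B C (max_singing_time T A B C)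

-- ===== LEMMAS AND PROOFS =====

-- reachability table: rtab cs t = [reach t, reach (t-1), …, reach 0]
def rtab (cs : List Int) : Nat → List Bool
  | 0 => [true]
  | t + 1 =>
    (cs.any fun c => decide (0 < c) && decide (c ≤ (t : Int) + 1) && (rtab cs t).getD (c.toNat - 1) false) :: rtab cs t

-- reach cs t : t is a sum of (positive) elements of cs
def rch (cs : List Int) (t : Nat) : Bool := (rtab cs t).headD false

-- mrch cs t : greatest reachable sum ≤ t
def mrch (cs : List Int) : Nat → Nat
  | 0 => 0
  | t + 1 => if rch cs (t + 1) then t + 1 else mrch cs t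

theorem rch_zero (cs : List Int) : rch cs 0 = true := rfl

theorem rtab_length (cs : List Int) : ∀ t, (rtab cs t).length = t + 1
  | 0 => rfl
  | t + 1 => by simp [rtab, rtab_length cs t]

theorem rtab_getD (cs : List Int) : ∀ (t i : Nat), i ≤ t → (rtab cs t).getD (t - i) false = rch cs i := by
  intro t
  induction t with
  | zero =>
    intro i hi
    interval_cases i
    rfl
  | succ t ih =>
    intro i hi
    rcases Nat.eq_or_lt_of_le hi with h | h
    · subst h
      simp [rtab, rch]
    · have hi' : i ≤ t := by omega
      have he : t + 1 - i = (t - i) + 1 := by omega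
      rw [he, rtab]
      simpa using ih i hi' 

theorem rch_succ (cs : List Int) (t : Nat) :
    rch cs (t + 1) = cs.any (fun c => decide (0 < c) && decide (c ≤ (t : Int) + 1) && rch cs (t + 1 - c.toNat)) := by
  rw [rch, rtab]
  simp only [List.headD_cons]
  refine List.any_congr rfl ?_
  intro c
  by_cases h1 : 0 < c
  · by_cases h2 : c ≤ (t : Int) + 1
    · have hc1 : 1 ≤ c.toNat := by omega
      have hc2 : c.toNat ≤ t + 1 := by omega
      have he : c.toNat - 1 = t - (t + 1 - c.toNat) := by omega
      rw [he, rtab_getD cs t (t + 1 - c.toNat) (by omega)]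
    · simp [h2]
  · simp [h1]

theorem rch_add (cs : List Int) (c : Int) (hc : c ∈ cs) (hpos : 0 < c) (s : Nat) (h : rch cs s = true) :
    rch cs (s + c.toNat) = true := by
  have hc1 : 1 ≤ c.toNat := by omega
  have he : s + c.toNat = (s + (c.toNat - 1)) + 1 := by omega
  rw [he, rch_succ]
  apply List.any_eq_true.mpr
  refine ⟨c, hc, ?_⟩
  have g2 : c ≤ ((s + (c.toNat - 1) : Nat) : Int) + 1 := by omega
  have hidx : s + (c.toNat - 1) + 1 - c.toNat = s := by omega
  simp [hpos, hidx, h]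
  omega

theorem rch_sub (cs cs' : List Int) (hsub : ∀ x ∈ cs, x ∈ cs') :
    ∀ t, rch cs t = true → rch cs' t = true := by
  intro t
  induction t using Nat.strong_induction_on with
  | _ t ih =>
    match t with
    | 0 => intro _; exact rch_zero cs'
    | t + 1 =>
      intro h
      rw [rch_succ] at h ⊢
      obtain ⟨c, hc, hcc⟩ := List.any_eq_true.mp h
      simp only [Bool.and_eq_true, decide_eq_true_eq] at hcc
      obtain ⟨⟨h1, h2⟩, h3⟩ := hcc
      apply List.any_eq_true.mpr
      refine ⟨c, hsub c hc, ?_⟩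
      have := ih (t + 1 - c.toNat) (by omega) h3
      simp [h1, h2, this]

theorem rch_cons_iff (c : Int) (cs : List Int) :
    ∀ t, rch (c :: cs) t = true ↔
      (rch cs t = true ∨ (0 < c ∧ c ≤ (t : Int) ∧ rch (c :: cs) (t - c.toNat) = true)) := by
  intro t
  induction t using Nat.strong_induction_on with
  | _ t ih =>
    match t with
    | 0 => exact ⟨fun _ => Or.inl (rch_zero cs), fun _ => rch_zero (c :: cs)⟩
    | t + 1 =>
      constructor
      · intro h
        rw [rch_succ] at h
        obtain ⟨c', hc', hcc⟩ := List.any_eq_true.mp h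
        simp only [Bool.and_eq_true, decide_eq_true_eq] at hcc
        obtain ⟨⟨h1, h2⟩, h3⟩ := hcc
        rcases List.mem_cons.mp hc' with rfl | hmem
        · exact Or.inr ⟨h1, by push_cast; omega, h3⟩
        · rcases ih (t + 1 - c'.toNat) (by omega) |>.mp h3 with h' | ⟨hc0, hcle, hrec⟩
          · refine Or.inl ?_
            rw [rch_succ]
            apply List.any_eq_true.mpr
            exact ⟨c', hmem, by simp [h1, h2, h']⟩
          · refine Or.inr ⟨hc0, by push_cast; omega, ?_⟩
            have heq : t + 1 - c.toNat = (t + 1 - c'.toNat - c.toNat) + c'.toNat := by omega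
            rw [heq]
            exact rch_add (c :: cs) c' (List.mem_cons_of_mem c hmem) h1 _ hrec
      · intro h
        rcases h with h | ⟨h1, h2, h3⟩
        · exact rch_sub cs (c :: cs) (fun x hx => List.mem_cons_of_mem c hx) _ h
        · have heq : t + 1 = (t + 1 - c.toNat) + c.toNat := by omega
          rw [heq]
          exact rch_add (c :: cs) c (List.mem_cons_self) h1 _ h3

theorem rch_congr (cs cs' : List Int) (h : ∀ x, x ∈ cs ↔ x ∈ cs') (t : Nat) : rch cs t = rch cs' t := by
  by_cases h1 : rch cs t = true
  · rw [h1, rch_sub cs cs' (fun x hx => (h x).mp hx) t h1]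
  · by_cases h2 : rch cs' t = true
    · exact absurd (rch_sub cs' cs (fun x hx => (h x).mpr hx) t h2) h1
    · rw [Bool.not_eq_true] at h1 h2
      rw [h1, h2]

theorem mrch_le (cs : List Int) : ∀ t, mrch cs t ≤ t := by
  intro t
  induction t with
  | zero => exact Nat.le_refl 0
  | succ t ih => rw [mrch]; split <;> omega

theorem mrch_step (cs : List Int) (t : Nat) : mrch cs t ≤ mrch cs (t + 1) := by
  rw [show mrch cs (t + 1) = if rch cs (t + 1) then t + 1 else mrch cs t from rfl]
  split
  · have := mrch_le cs t; omega
  · exact Nat.le_refl _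

theorem mrch_mono (cs : List Int) : ∀ {s t : Nat}, s ≤ t → mrch cs s ≤ mrch cs t := by
  intro s t h
  induction t with
  | zero => have : s = 0 := by omega
            subst this; exact Nat.le_refl _
  | succ t ih =>
    rcases Nat.eq_or_lt_of_le h with rfl | h'
    · exact Nat.le_refl _
    · exact Nat.le_trans (ih (by omega)) (mrch_step cs t)

theorem rch_mrch (cs : List Int) : ∀ t, rch cs (mrch cs t) = true := by
  intro t
  induction t with
  | zero => exact rch_zero cs
  | succ t ih =>
    rw [mrch]
    split
    · assumption
    · exact ih

theorem mrch_ge (cs : List Int) : ∀ (t s : Nat), rch cs s = true → s ≤ t → s ≤ mrch cs t := by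
  intro t
  induction t with
  | zero => intro s _ h; omega
  | succ t ih =>
    intro s hs hle
    rcases Nat.eq_or_lt_of_le hle with rfl | h'
    · rw [mrch, if_pos hs]
    · exact Nat.le_trans (ih s hs (by omega)) (mrch_step cs t)

theorem mrch_nil : ∀ t, mrch [] t = 0 := by
  intro t
  induction t with
  | zero => rfl
  | succ t ih =>
    rw [mrch, rch_succ]
    simpa using ih

theorem mrch_congr (cs cs' : List Int) (h : ∀ x, x ∈ cs ↔ x ∈ cs') (t : Nat) : mrch cs t = mrch cs' t := by
  induction t with
  | zero => rfl
  | succ t ih => rw [mrch, mrch, rch_congr cs cs' h (t + 1), ih]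

theorem rch_cons_lo (c : Int) (cs : List Int) (t : Nat) (h : (t : Int) < c) : rch (c :: cs) t = rch cs t := by
  by_cases hb : rch cs t = true
  · rw [hb, (rch_cons_iff c cs t).mpr (Or.inl hb)]
  · have hl : ¬ rch (c :: cs) t = true := by
      intro hh
      rcases (rch_cons_iff c cs t).mp hh with h' | ⟨_, hle, _⟩
      · exact hb h'
      · omega
    rw [Bool.not_eq_true] at hl hb
    rw [hl, hb]

theorem rch_cons_nonpos (c : Int) (cs : List Int) (hc : ¬ 0 < c) (t : Nat) : rch (c :: cs) t = rch cs t := by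
  by_cases hb : rch cs t = true
  · rw [hb, (rch_cons_iff c cs t).mpr (Or.inl hb)]
  · have hl : ¬ rch (c :: cs) t = true := by
      intro hh
      rcases (rch_cons_iff c cs t).mp hh with h' | ⟨hc', _, _⟩
      · exact hb h'
      · exact hc hc'
    rw [Bool.not_eq_true] at hl hb
    rw [hl, hb]

theorem mrch_cons_lo (c : Int) (cs : List Int) : ∀ (t : Nat), (t : Int) < c → mrch (c :: cs) t = mrch cs t := by
  intro t
  induction t with
  | zero => intro _; rfl
  | succ t ih =>
    intro h
    rw [mrch, mrch, rch_cons_lo c cs (t + 1) h, ih (by push_cast at h ⊢; omega)]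

theorem mrch_cons_nonpos (c : Int) (cs : List Int) (hc : ¬ 0 < c) : ∀ t, mrch (c :: cs) t = mrch cs t := by
  intro t
  induction t with
  | zero => rfl
  | succ t ih => rw [mrch, mrch, rch_cons_nonpos c cs hc (t + 1), ih]

theorem mrch_cons_key (c : Int) (cs : List Int) (t : Nat) (hc : 0 < c) (h : c ≤ (t : Int)) :
    mrch (c :: cs) t = max (mrch cs t) (mrch (c :: cs) (t - c.toNat) + c.toNat) := by
  apply Nat.le_antisymm
  · rcases (rch_cons_iff c cs (mrch (c :: cs) t)).mp (rch_mrch (c :: cs) t) with h' | ⟨_, hle, hrec⟩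
    · exact le_max_of_le_left (mrch_ge cs t _ h' (mrch_le _ t))
    · apply le_max_of_le_right
      have h4 : mrch (c :: cs) t - c.toNat ≤ t - c.toNat := by
        have := mrch_le (c :: cs) t; omega
      have h5 := mrch_ge (c :: cs) (t - c.toNat) (mrch (c :: cs) t - c.toNat) hrec h4
      omega
  · apply max_le
    · exact mrch_ge (c :: cs) t _
        (rch_sub cs (c :: cs) (fun x hx => List.mem_cons_of_mem c hx) _ (rch_mrch cs t)) (mrch_le cs t)
    · apply mrch_ge (c :: cs) t
      · exact rch_add (c :: cs) c (List.mem_cons_self) hc _ (rch_mrch (c :: cs) (t - c.toNat))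
      · have := mrch_le (c :: cs) (t - c.toNat); omega

theorem passA_aux (N : Nat) (P : List Int) (c : Int) (hc : 0 ≤ c) :
    ∀ (k : Nat) (t : Int) (dp : List Int), (N : Int) + 1 - t = (k : Int) → c ≤ t →
      dp.length = N + 1 →
      (∀ i : Nat, i ≤ N → PySem.List.pyGetD dp (i : Int) 0 =
        if (i : Int) < t then (mrch (c :: P) i : Int) else (mrch P i : Int)) →
      ((PySem.List.pyRange t ((N : Int) + 1) 1).foldl (fun dp t =>
          PySem.List.pySetD dp t
            (max (PySem.List.pyGetD dp t 0) (PySem.List.pyGetD dp (t - c) 0 + c))) dp).length = N + 1 ∧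
      (∀ i : Nat, i ≤ N → PySem.List.pyGetD ((PySem.List.pyRange t ((N : Int) + 1) 1).foldl (fun dp t =>
          PySem.List.pySetD dp t
            (max (PySem.List.pyGetD dp t 0) (PySem.List.pyGetD dp (t - c) 0 + c))) dp) (i : Int) 0 =
        (mrch (c :: P) i : Int)) := by
  intro k
  induction k with
  | zero =>
    intro t dp hk hct hlen hdp
    rw [PySem.List.pyRange_one_eq_nil (by omega), List.foldl_nil]
    refine ⟨hlen, fun i hi => ?_⟩
    have := hdp i hi
    rw [if_pos (by omega)] at this
    exact this
  | succ k ih =>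
    intro t dp hk hct hlen hdp
    obtain ⟨tn, rfl⟩ : ∃ n : Nat, t = (n : Int) := ⟨t.toNat, by omega⟩
    rw [PySem.List.pyRange_one_cons (by omega), List.foldl_cons]
    have htN : tn ≤ N := by omega
    have hval : max (PySem.List.pyGetD dp (tn : Int) 0) (PySem.List.pyGetD dp ((tn : Int) - c) 0 + c) =
        (mrch (c :: P) tn : Int) := by
      have hcur : PySem.List.pyGetD dp (tn : Int) 0 = (mrch P tn : Int) := by
        have := hdp tn htN
        rw [if_neg (by omega)] at this
        exact this
      by_cases hc0 : 0 < c
      · have hsub : ((tn - c.toNat : Nat) : Int) = (tn : Int) - c := by omega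
        have hprev : PySem.List.pyGetD dp ((tn : Int) - c) 0 = (mrch (c :: P) (tn - c.toNat) : Int) := by
          have := hdp (tn - c.toNat) (by omega)
          rw [if_pos (by omega)] at this
          rw [← hsub]
          exact this
        rw [hcur, hprev, mrch_cons_key c P tn hc0 (by omega)]
        push_cast
        omega
      · have hceq : c = 0 := by omega
        subst hceq
        rw [sub_zero, hcur, mrch_cons_nonpos 0 P (by omega) tn]
        omega
    rw [hval, PySem.List.pySetD_natCast]
    refine ih ((tn : Int) + 1) _ (by omega) (by omega) (by rw [List.length_set]; exact hlen) ?_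
    intro i hi
    have hset := PySem.List.pyGetD_pySetD_natCast dp tn i ((mrch (c :: P) tn : Nat) : Int) 0 (by omega)
    rw [PySem.List.pySetD_natCast] at hset
    rw [hset]
    by_cases hit : i = tn
    · subst hit
      rw [if_pos rfl, if_pos (by omega)]
    · rw [if_neg hit, hdp i hi]
      by_cases hlt : (i : Int) < (tn : Int)
      · rw [if_pos hlt, if_pos (by omega)]
      · rw [if_neg hlt, if_neg (by omega)]

theorem coinPass (N : Nat) (P : List Int) (c : Int) (hc : 0 ≤ c) (dp : List Int)
    (hlen : dp.length = N + 1)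
    (hdp : ∀ i : Nat, i ≤ N → PySem.List.pyGetD dp (i : Int) 0 = (mrch P i : Int)) :
    ((PySem.List.pyRange c ((N : Int) + 1) 1).foldl (fun dp t =>
        PySem.List.pySetD dp t
          (max (PySem.List.pyGetD dp t 0) (PySem.List.pyGetD dp (t - c) 0 + c))) dp).length = N + 1 ∧
    (∀ i : Nat, i ≤ N → PySem.List.pyGetD ((PySem.List.pyRange c ((N : Int) + 1) 1).foldl (fun dp t =>
        PySem.List.pySetD dp t
          (max (PySem.List.pyGetD dp t 0) (PySem.List.pyGetD dp (t - c) 0 + c))) dp) (i : Int) 0 =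
      (mrch (c :: P) i : Int)) := by
  by_cases hbig : (N : Int) + 1 ≤ c
  · rw [PySem.List.pyRange_one_eq_nil hbig, List.foldl_nil]
    refine ⟨hlen, fun i hi => ?_⟩
    rw [hdp i hi, mrch_cons_lo c P i (by omega)]
  · refine passA_aux N P c hc ((N : Int) + 1 - c).toNat c dp (by omega) le_rfl hlen ?_
    intro i hi
    rw [hdp i hi]
    by_cases hlt : (i : Int) < c
    · rw [if_pos hlt, mrch_cons_lo c P i hlt]
    · rw [if_neg hlt]

theorem finalLoop_aux (N : Nat) (dp : List Int) (cs : List Int)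
    (hdp : ∀ i : Nat, i ≤ N → PySem.List.pyGetD dp (i : Int) 0 = (mrch cs i : Int)) :
    ∀ (k : Nat) (t : Int) (m : Int), (N : Int) + 1 - t = (k : Int) → 0 ≤ t →
      m = (mrch cs (t.toNat - 1) : Int) →
      (PySem.List.pyRange t ((N : Int) + 1) 1).foldl (fun m i =>
        if PySem.List.pyGetD dp i 0 > 0 then max m (PySem.List.pyGetD dp i 0) else m) m = (mrch cs N : Int) := by
  intro k
  induction k with
  | zero =>
    intro t m hk ht hm
    rw [PySem.List.pyRange_one_eq_nil (by omega), List.foldl_nil, hm]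
    have : t.toNat - 1 = N := by omega
    rw [this]
  | succ k ih =>
    intro t m hk ht hm
    obtain ⟨tn, rfl⟩ : ∃ n : Nat, t = (n : Int) := ⟨t.toNat, by omega⟩
    rw [PySem.List.pyRange_one_cons (by omega), List.foldl_cons]
    have hdt : PySem.List.pyGetD dp (tn : Int) 0 = (mrch cs tn : Int) := hdp tn (by omega)
    refine ih ((tn : Int) + 1) _ (by omega) (by omega) ?_
    rw [hdt, hm]
    have hmono : mrch cs ((tn : Int).toNat - 1) ≤ mrch cs tn := mrch_mono cs (by omega)
    have h1 : ((tn : Int) + 1).toNat - 1 = tn := by omega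
    rw [h1]
    by_cases hpos : (mrch cs tn : Int) > 0
    · rw [if_pos hpos]
      have : (mrch cs ((tn : Int).toNat - 1) : Int) ≤ (mrch cs tn : Int) := by exact_mod_cast hmono
      omega
    · rw [if_neg hpos]
      have : mrch cs tn = 0 := by omega
      have h2 : (tn : Int).toNat - 1 ≤ tn := by omega
      have := mrch_mono cs h2
      omega

theorem passB_aux (N : Nat) (A B C : Int) :
    ∀ (k : Nat) (t : Int) (st : List Bool × Int), (N : Int) + 1 - t = (k : Int) → 1 ≤ t →
      st.1.length = t.toNat →
      (∀ i : Nat, i < t.toNat → st.1.getD i false = rch [A, B, C] i) →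
      st.2 = (mrch [A, B, C] (t.toNat - 1) : Int) →
      ((PySem.List.pyRange t ((N : Int) + 1) 1).foldl (fun (st : List Bool × Int) t =>
        let ok := [A, B, C].any (fun c =>
          decide (0 < c) && decide (c ≤ t) && ((PySem.List.pyGet? st.1 (t - c)).getD false))
        (st.1 ++ [ok], if ok then t else st.2)) st).2 = (mrch [A, B, C] N : Int) := by
  intro k
  induction k with
  | zero =>
    intro t st hk ht hlen hreach hbest
    rw [PySem.List.pyRange_one_eq_nil (by omega), List.foldl_nil, hbest]
    have : t.toNat - 1 = N := by omega
    rw [this]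
  | succ k ih =>
    intro t st hk ht hlen hreach hbest
    obtain ⟨tn, rfl⟩ : ∃ n : Nat, t = (n : Int) := ⟨t.toNat, by omega⟩
    rw [PySem.List.pyRange_one_cons (by omega), List.foldl_cons]
    rw [Int.toNat_natCast] at hlen hbest
    have htn1 : tn = (tn - 1) + 1 := by omega
    have hok : [A, B, C].any (fun c =>
        decide (0 < c) && decide (c ≤ (tn : Int)) && ((PySem.List.pyGet? st.1 ((tn : Int) - c)).getD false)) =
        rch [A, B, C] tn := by
      rw [htn1, rch_succ, ← htn1]
      refine List.any_congr rfl ?_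
      intro c
      by_cases h1 : 0 < c
      · by_cases h2 : c ≤ (tn : Int)
        · have h2' : c ≤ ((tn - 1 : Nat) : Int) + 1 := by omega
          have hsub : ((tn - c.toNat : Nat) : Int) = (tn : Int) - c := by omega
          have hlt : tn - c.toNat < st.1.length := by rw [hlen]; omega
          have hgd := hreach (tn - c.toNat) (by omega)
          rw [List.getD_eq_getElem?_getD, List.getElem?_eq_getElem hlt, Option.getD_some] at hgd
          rw [← hsub, PySem.List.pyGet?_natCast, List.getElem?_eq_getElem hlt, Option.getD_some,
            hgd]
          simp [h2, h2']
        · have h2' : ¬ c ≤ ((tn - 1 : Nat) : Int) + 1 := by omega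
          simp [h2, h2']
      · simp [h1]
    have hstep : (let ok := [A, B, C].any (fun c =>
          decide (0 < c) && decide (c ≤ (tn : Int)) && ((PySem.List.pyGet? st.1 ((tn : Int) - c)).getD false))
        ((st.1 ++ [ok], if ok = true then (tn : Int) else st.2) : List Bool × Int)) =
        (st.1 ++ [rch [A, B, C] tn], if rch [A, B, C] tn then (tn : Int) else st.2) := by
      simp only
      rw [hok]
    rw [hstep]
    refine ih ((tn : Int) + 1) _ (by omega) (by omega) ?_ ?_ ?_
    · simp only [List.length_append, List.length_cons, List.length_nil, hlen]
      omega
    · intro i hi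
      simp only
      by_cases hlt : i < tn
      · rw [List.getD_append _ _ _ _ (by rw [hlen]; exact hlt)]
        exact hreach i hlt
      · have hieq : i = tn := by omega
        subst hieq
        rw [List.getD_append_right _ _ _ _ (by omega)]
        simp [hlen]
    · simp only
      have h2 : ((tn : Int) + 1).toNat - 1 = tn := by omega
      rw [h2, htn1,
        show mrch [A, B, C] ((tn - 1) + 1) =
          if rch [A, B, C] ((tn - 1) + 1) then (tn - 1) + 1 else mrch [A, B, C] (tn - 1) from rfl,
        ← htn1]
      by_cases hr : rch [A, B, C] tn = true
      · rw [hr]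
        simp
      · rw [Bool.not_eq_true] at hr
        rw [hr]
        simpa using hbest

-- ===== VERDICT (by name: the statement is the Claim_ definition above) =====
theorem max_singing_time_spec : Claim_equal_max_singing_time := by
  intro T A B C _ hpre
  obtain ⟨hA, hB, hC⟩ := hpre
  unfold Spec_max_singing_time max_singing_time max_singing_time_alt
  by_cases hT : T < 0
  · have hA' : T + 1 ≤ A := by omega
    have hB' : T + 1 ≤ B := by omega
    have hC' : T + 1 ≤ C := by omega
    simp only [List.foldl_cons, List.foldl_nil]
    rw [PySem.List.pyRange_one_eq_nil hA', List.foldl_nil,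
      PySem.List.pyRange_one_eq_nil hB', List.foldl_nil,
      PySem.List.pyRange_one_eq_nil hC', List.foldl_nil,
      PySem.List.pyRange_one_eq_nil (by omega : T + 1 ≤ 0), List.foldl_nil,
      PySem.List.pyRange_one_eq_nil (by omega : T + 1 ≤ 1), List.foldl_nil]
  · obtain ⟨N, rfl⟩ : ∃ n : Nat, T = (n : Int) := ⟨T.toNat, by omega⟩
    have hA0 : 0 ≤ A := by omega
    have hB0 : 0 ≤ B := by omega
    have hC0 : 0 ≤ C := by omega
    simp only [List.foldl_cons, List.foldl_nil]
    have hlen0 : (List.replicate ((N : Int) + 1).toNat (0 : Int)).length = N + 1 := by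
      rw [List.length_replicate]; omega
    have h0 : ∀ i : Nat, i ≤ N →
        PySem.List.pyGetD (List.replicate ((N : Int) + 1).toNat (0 : Int)) (i : Int) 0 = (mrch [] i : Int) := by
      intro i hi
      rw [mrch_nil, PySem.List.pyGetD_natCast, List.getD_eq_getElem?_getD, List.getElem?_replicate]
      split <;> simp
    have hc1 := coinPass N [] A hA0 _ hlen0 h0
    have hc2 := coinPass N [A] B hB0 _ hc1.1 hc1.2
    have hc3 := coinPass N [B, A] C hC0 _ hc2.1 hc2.2
    have hfin := finalLoop_aux N _ [C, B, A] hc3.2 (N + 1) 0 0 (by omega) (by omega) (by simp [mrch])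
    have hBside := passB_aux N A B C N 1 ([true], 0) (by omega) (by omega) (by simp)
      (by
        intro i hi
        have hz : i = 0 := by omega
        subst hz
        rfl)
      (by simp [mrch])
    rw [hfin, hBside, mrch_congr [C, B, A] [A, B, C] (by intro x; simp [List.mem_cons]; tauto) N]
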